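-- pv_equiv track=rewrite | github.com/CallocGD/Geode-Bindings-Generator | __references__/generate.py | reorderFuncs
-- ===== SOURCE A (Python) =====
-- def is_static_function(className: str, funcSig: str):
--     """
--     ```js
--     function isStaticFunc(className, funcSig) {
--         return funcSig.startsWith('create(')
--         || className == 'GameToolbox'
--         || funcSig == 'sharedState()'
--         || funcSig == 'sharedEngine()'
--         || funcSig == 'sharedDecoder()'
--         || funcSig == 'sharedFontCache()'
--         || funcSig == 'sharedSpriteFrameCache()'
--     }
--     ```
--     """
--     return (
--         funcSig.startswith("create(")
--         or (className == "GameToolBox")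
--         or funcSig
--         in [
--             "sharedState()",
--             "sharedEngine()",
--             "sharedDecoder()",
--             "sharedFontCache()",
--             "sharedSpriteFrameCache()",
--         ]
--     )
--
-- def vtableIndexForFunc(vtable: dict[str, list[list[str]]], name: str, funcSig: str):
--     if not vtable.get(name):
--         return
--
--     tables = vtable[name]
--     if not tables:
--         return
--     for table in tables:
--         try:
--             return table.index(funcSig)
--         except ValueError:
--             continue
--
-- def groupForFunction(vtable: dict[str, list[list[str]]], className: str, funcSig: str):
--     if funcSig.startswith((f"{className}(", "~")):
--         return -3
--     elif is_static_function(className, funcSig):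
--         return -2
--
--     vi = vtableIndexForFunc(vtable, className, funcSig)
--     if vi is None:
--         return -1
--
--     return [0, vi]
--
-- def reorderFuncs(vtable: dict[str, list[list[str]]], className: str, funcs: list[str]):
--     out: dict[int, list[tuple[str, int]]] = {}
--     for sig in funcs:
--         index = groupForFunction(vtable, className, sig)
--
--         if isinstance(index, list):
--             group = 0
--             order = index[1]
--         else:
--             group = index
--             order = 0
--         if not out.get(group):
--             out[group] = []
--         out[group].append((sig, order))
--
--     new_funcs: dict[int, list[list[str]]] = {}
--     for k, v in sorted(out.items()):
--         # Sort by name and then by order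
--         inner_dict: dict[int, list[str]] = {}
--         for func, pos in v:
--             if not inner_dict.get(pos):
--                 inner_dict[pos] = [func]
--             else:
--                 inner_dict[pos].append(func)
--
--         if not new_funcs.get(k):
--             new_funcs[k] = []
--
--         for _, v in sorted(inner_dict.items()):
--             v.sort()
--             new_funcs[k].append(v)
--     return new_funcs
-- ===== SOURCE B (Python) =====
-- def is_static_function(className: str, funcSig: str):
--     return (
--         funcSig.startswith("create(")
--         or (className == "GameToolBox")
--         or funcSig
--         in [
--             "sharedState()",
--             "sharedEngine()",
--             "sharedDecoder()",
--             "sharedFontCache()",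
--             "sharedSpriteFrameCache()",
--         ]
--     )
--
-- def vtableIndexForFunc(vtable, name, funcSig):
--     if not vtable.get(name):
--         return
--     tables = vtable[name]
--     if not tables:
--         return
--     for table in tables:
--         try:
--             return table.index(funcSig)
--         except ValueError:
--             continue
--
-- def groupForFunction(vtable, className, funcSig):
--     if funcSig.startswith((f"{className}(", "~")):
--         return -3
--     elif is_static_function(className, funcSig):
--         return -2
--     vi = vtableIndexForFunc(vtable, className, funcSig)
--     if vi is None:
--         return -1
--     return [0, vi]
--
-- def reorderFuncs(vtable, className, funcs):
--     # One keyed pass, then nested comprehensions over the sorted distinct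
--     # (group, order) keys: no accumulator dicts at all.
--     def key(sig):
--         idx = groupForFunction(vtable, className, sig)
--         return (0, idx[1]) if isinstance(idx, list) else (idx, 0)
--
--     keyed = [(key(sig), sig) for sig in funcs]
--     return {
--         g: [sorted(s for (kg, ko), s in keyed if (kg, ko) == (g, o))
--             for o in sorted({ko for (kg, ko), _ in keyed if kg == g})]
--         for g in sorted({kg for (kg, _), _ in keyed})
--     }
-- ===== Notes on version B (the rewrite author's own statement) =====
-- stated objective: simpler
-- what changed: Replaces A's two accumulator dicts, per-bucket inner dicts and per-group in-place sorts with one keyed pass over funcs followed by nested comprehensions over the sorted distinct (group, order) keys, filtering and sorting each bucket directly.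
import Mathlib
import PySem

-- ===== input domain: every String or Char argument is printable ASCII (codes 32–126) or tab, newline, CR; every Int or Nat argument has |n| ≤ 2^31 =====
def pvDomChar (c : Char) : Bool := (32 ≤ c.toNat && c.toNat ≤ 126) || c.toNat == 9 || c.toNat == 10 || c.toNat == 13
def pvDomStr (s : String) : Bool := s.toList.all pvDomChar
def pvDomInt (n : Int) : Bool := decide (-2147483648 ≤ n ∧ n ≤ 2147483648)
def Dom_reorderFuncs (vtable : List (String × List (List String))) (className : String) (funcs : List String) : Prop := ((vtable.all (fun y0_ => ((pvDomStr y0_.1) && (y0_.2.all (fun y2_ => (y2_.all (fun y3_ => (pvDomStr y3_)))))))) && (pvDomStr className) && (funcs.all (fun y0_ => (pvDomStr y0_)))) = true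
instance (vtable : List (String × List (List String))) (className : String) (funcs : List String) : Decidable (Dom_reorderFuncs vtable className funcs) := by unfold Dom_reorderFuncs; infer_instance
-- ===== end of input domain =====

-- B re-implements reorderFuncs with no accumulator dicts: one keyed pass, then nested
-- comprehensions over the sorted distinct (group, order) keys; objective: simpler.

-- ===== PORT A =====
-- shared module helper: is_static_function
def isStaticFunction (className : String) (funcSig : String) : Bool :=
  PySem.Str.startswith funcSig "create(" || className == "GameToolBox" ||
  ["sharedState()", "sharedEngine()", "sharedDecoder()", "sharedFontCache()",
   "sharedSpriteFrameCache()"].contains funcSig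

-- shared module helper: vtableIndexForFunc; `vtable.get(name)` is first-match lookup,
-- `if not vtable.get(name)` is falsy also on an empty table list
def vtableIndexForFunc (vtable : List (String × List (List String))) (name : String) (funcSig : String) : Option Int :=
  match vtable.find? (fun p => p.1 == name) with
  | none => none
  | some (_, tables) =>
    if tables.isEmpty then none
    else tables.findSome? (fun t => (PySem.List.index? t funcSig).map (fun i => (i : Int)))

-- shared module helper: groupForFunction; `.inr vi` stands for Python's list [0, vi],
-- `.inl g` for a plain int return
def groupForFunction (vtable : List (String × List (List String))) (className : String) (funcSig : String) : Int ⊕ Int :=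
  if PySem.Str.startswith funcSig (className ++ "(") || PySem.Str.startswith funcSig "~" then .inl (-3)
  else if isStaticFunction className funcSig then .inl (-2)
  else match vtableIndexForFunc vtable className funcSig with
       | none => .inl (-1)
       | some vi => .inr vi

-- loop body of A's second loop (`for k, v in sorted(out.items())`), named for the proofs
def aInnerDict (v : List (String × Int)) : PySem.Dict Int (List String) :=
  v.foldl (fun idict fp =>
    if (idict.getD fp.2 []).isEmpty then idict.insert fp.2 [fp.1]
    else idict.modify fp.2 [] (fun l => l ++ [fp.1])) PySem.Dict.empty

def aOuterStep (nf : PySem.Dict Int (List (List String))) (kv : Int × List (String × Int)) : PySem.Dict Int (List (List String)) :=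
  let innerDict := aInnerDict kv.2
  let nf := if (nf.getD kv.1 []).isEmpty then nf.insert kv.1 [] else nf
  (PySem.List.sorted innerDict.items (fun p => p.1)).foldl
    (fun nf ov => nf.modify kv.1 [] (fun l => l ++ [PySem.List.sorted ov.2 (fun x => x)])) nf

-- `sorted(out.items())` compares int-keyed tuples; the keys are distinct, so the
-- comparison never reads the second component: sort by the key
def reorderFuncs (vtable : List (String × List (List String))) (className : String) (funcs : List String) : List (Int × List (List String)) :=
  let out : PySem.Dict Int (List (String × Int)) := funcs.foldl (fun out sig =>
    let index := groupForFunction vtable className sig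
    let (group, order) : Int × Int := match index with
      | .inr vi => (0, vi)
      | .inl g => (g, 0)
    let out := if (out.getD group []).isEmpty then out.insert group [] else out
    out.modify group [] (fun v => v ++ [(sig, order)])) PySem.Dict.empty
  ((PySem.List.sorted out.items (fun p => p.1)).foldl aOuterStep PySem.Dict.empty).items

-- ===== PORT B =====
-- B's key(sig): `(0, idx[1]) if isinstance(idx, list) else (idx, 0)`
def keyOf (vtable : List (String × List (List String))) (className : String) (sig : String) : Int × Int :=
  match groupForFunction vtable className sig with
  | .inr vi => (0, vi)
  | .inl g => (g, 0)

def reorderFuncs_alt (vtable : List (String × List (List String))) (className : String) (funcs : List String) : List (Int × List (List String)) :=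
  let keyed := funcs.map (fun sig => (keyOf vtable className sig, sig))
  let groups := PySem.List.sorted (PySem.Set.ofList (keyed.map (fun p => p.1.1))) (fun x => x)
  groups.map (fun g =>
    (g, (PySem.List.sorted (PySem.Set.ofList ((keyed.filter (fun p => p.1.1 == g)).map (fun p => p.1.2))) (fun x => x)).map
      (fun o => PySem.List.sorted ((keyed.filter (fun p => p.1 == (g, o))).map (fun p => p.2)) (fun x => x))))

-- ===== PRECONDITION & SPEC =====
def Spec_reorderFuncs (vtable : List (String × List (List String))) (className : String) (funcs : List String) (out : List (Int × List (List String))) : Prop := out = reorderFuncs_alt vtable className funcs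
instance (vtable : List (String × List (List String))) (className : String) (funcs : List String) (out : List (Int × List (List String))) : Decidable (Spec_reorderFuncs vtable className funcs out) := by unfold Spec_reorderFuncs; infer_instance

-- ===== CLAIM (what is proved, stated in full; the proofs are below) =====
def Claim_equal_reorderFuncs : Prop := ∀ (vtable : List (String × List (List String))) (className : String) (funcs : List String), Dom_reorderFuncs vtable className funcs → Spec_reorderFuncs vtable className funcs (reorderFuncs vtable className funcs)

-- ===== LEMMAS AND PROOFS =====

-- the generic "append under a key" dict-building fold both of A's grouping loops reduce to
def pvBuild {κ β : Type} [BEq κ] (l : List (κ × β)) : PySem.Dict κ (List β) :=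
  l.foldl (fun d p => d.modify p.1 [] (fun v => v ++ [p.2])) PySem.Dict.empty

-- the (group, (sig, order)) view of one element of funcs
def pvM (vtable : List (String × List (List String))) (className : String) (s : String) : Int × (String × Int) :=
  ((keyOf vtable className s).1, (s, (keyOf vtable className s).2))

-- what one pass of A's emitting loop appends for the bucket v
def aInnerLists (v : List (String × Int)) : List (List String) :=
  (PySem.List.sorted (aInnerDict v).items (fun p => p.1)).map (fun ov => PySem.List.sorted ov.2 (fun x => x))

lemma pvBuild_getD {κ β : Type} [BEq κ] [LawfulBEq κ] (l : List (κ × β)) (c : κ) :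
    (pvBuild l).getD c [] = (l.filter (fun p => p.1 == c)).map (fun p => p.2) := by
  simp [pvBuild, PySem.Dict.getD_foldl_modify_append]

lemma pvBuild_keys {κ β : Type} [BEq κ] [LawfulBEq κ] (l : List (κ × β)) :
    (pvBuild l).keys = PySem.Set.ofList (l.map (fun p => p.1)) := by
  unfold pvBuild
  rw [PySem.Dict.keys_foldl_modify_key l (fun p => p.1) [] (fun d x => (fun v => v ++ [x.2]))]
  rw [PySem.Set.update_eq_append_filter]
  simp [PySem.Dict.keys_empty, PySem.Set.contains]

lemma pvBuild_nodup {κ β : Type} [BEq κ] [LawfulBEq κ] (l : List (κ × β)) :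
    (pvBuild l).keys.Nodup := by
  unfold pvBuild
  exact PySem.Dict.nodup_keys_foldl_modify_key l (fun p => p.1) [] (fun d x => (fun v => v ++ [x.2])) _ PySem.Dict.nodup_keys_empty

lemma sorted_items_pvBuild {β : Type} (l : List (Int × β)) :
    PySem.List.sorted (pvBuild l).items (fun p => p.1)
      = (PySem.List.sorted (PySem.Set.ofList (l.map (fun p => p.1))) (fun x => x)).map
          (fun k => (k, (l.filter (fun p => p.1 == k)).map (fun p => p.2))) := by
  have hitems : (pvBuild l).items
      = (PySem.Set.ofList (l.map (fun p => p.1))).map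
          (fun k => (k, (l.filter (fun p => p.1 == k)).map (fun p => p.2))) := by
    rw [PySem.Dict.items_eq_map_keys (pvBuild l) (pvBuild_nodup l) []]
    rw [pvBuild_keys]
    exact List.map_congr_left (fun k _ => by rw [pvBuild_getD])
  apply PySem.List.sorted_eq_of_perm_of_pairwise_lt
  · rw [hitems]
    exact (PySem.List.sorted_perm _ _ _).map _
  · exact (PySem.List.sorted_ofList_pairwise_lt _).map _ (fun a b h => h)

-- A's `if not out.get(group): out[group] = []` guard before the append is a no-op
lemma guard_modify {κ β : Type} [BEq κ] [LawfulBEq κ] (d : PySem.Dict κ (List β)) (k : κ) (x : β) :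
    (if (d.getD k []).isEmpty then d.insert k [] else d).modify k [] (fun v => v ++ [x])
      = d.modify k [] (fun v => v ++ [x]) := by
  split_ifs with h
  · simp [PySem.Dict.modify, PySem.Dict.getD_insert_self, PySem.Dict.insert_insert_self,
      List.isEmpty_iff.mp h]
  · rfl

-- A's inner `if not inner_dict.get(pos): inner_dict[pos] = [func] else: …append` is the same append
lemma guard_insert_modify {κ β : Type} [BEq κ] [LawfulBEq κ] (d : PySem.Dict κ (List β)) (k : κ) (x : β) :
    (if (d.getD k []).isEmpty then d.insert k [x] else d.modify k [] (fun v => v ++ [x]))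
      = d.modify k [] (fun v => v ++ [x]) := by
  split_ifs with h
  · simp [PySem.Dict.modify, List.isEmpty_iff.mp h]
  · rfl

-- appending to a list under the LAST key of the items list
lemma modifyfold_items (ws : List (List String)) (k : Int) :
    ∀ (d : PySem.Dict Int (List (List String))) (pre : List (Int × List (List String))) (acc : List (List String)),
      d.items = pre ++ [(k, acc)] → d.keys.Nodup →
      (ws.foldl (fun nf w => nf.modify k [] (fun l => l ++ [w])) d).items = pre ++ [(k, acc ++ ws)] := by
  induction ws with
  | nil => intro d pre acc hi _; simpa using hi
  | cons w ws ih =>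
    intro d pre acc hi hnd
    have hkeys : d.keys = pre.map (fun p => p.1) ++ [k] := by
      simp only [PySem.Dict.keys, hi, List.map_append, List.map_cons, List.map_nil]
    have hknotin : k ∉ pre.map (fun p => p.1) := by
      rw [hkeys] at hnd
      intro hmem
      exact absurd rfl (((List.nodup_append.mp hnd).2.2 _ hmem) k (List.mem_singleton.mpr rfl))
    have hgetD : d.getD k [] = acc :=
      PySem.Dict.getD_of_mem_items d (by rw [hi]; simp) hnd []
    have hcont : d.contains k = true :=
      (PySem.Dict.contains_iff_mem_keys d k).mpr (by rw [hkeys]; simp)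
    have hstep : (d.modify k [] (fun l => l ++ [w])).items = pre ++ [(k, acc ++ [w])] := by
      rw [PySem.Dict.modify, hgetD, PySem.Dict.items_insert_of_contains d _ hcont, hi]
      rw [List.map_append]
      congr 1
      · have : List.map (fun p : Int × List (List String) => if (p.1 == k) = true then (k, acc ++ [w]) else p) pre = List.map id pre := by
          apply List.map_congr_left
          intro p hp
          simp only [id]
          have : p.1 ≠ k := fun he => hknotin (he ▸ List.mem_map_of_mem hp)
          simp [this]
        rw [this, List.map_id]
      · simp
    have hnd' : (d.modify k [] (fun l => l ++ [w])).keys.Nodup := by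
      have : (d.modify k [] (fun l => l ++ [w])).keys = pre.map (fun p => p.1) ++ [k] := by
        simp only [PySem.Dict.keys, hstep, List.map_append, List.map_cons, List.map_nil]
      rw [this, ← hkeys]; exact hnd
    simp only [List.foldl_cons]
    rw [ih _ pre (acc ++ [w]) hstep hnd', List.append_assoc]
    simp

lemma outer_fold (l : List (Int × List (String × Int))) :
    ∀ (nf : PySem.Dict Int (List (List String))),
      (l.map (fun p => p.1)).Nodup → (∀ p ∈ l, nf.contains p.1 = false) → nf.keys.Nodup →
      (l.foldl aOuterStep nf).items = nf.items ++ l.map (fun kv => (kv.1, aInnerLists kv.2)) := by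
  induction l with
  | nil => intro nf _ _ _; simp
  | cons kv rest ih =>
    intro nf hnd hfresh hknd
    rw [List.map_cons, List.nodup_cons] at hnd
    have hc : nf.contains kv.1 = false := hfresh kv (by simp)
    have hge : nf.getD kv.1 [] = [] := PySem.Dict.getD_of_not_contains nf [] hc
    have hstep : (aOuterStep nf kv).items = nf.items ++ [(kv.1, aInnerLists kv.2)] := by
      unfold aOuterStep
      simp only [hge, List.isEmpty_nil, if_pos]
      rw [show (List.foldl (fun nf ov => nf.modify kv.1 [] fun l => l ++ [PySem.List.sorted ov.2 fun x => x]) (nf.insert kv.1 [])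
            (PySem.List.sorted (aInnerDict kv.2).items fun p => p.1))
          = (List.foldl (fun (nf : PySem.Dict Int (List (List String))) (w : List String) => nf.modify kv.1 [] fun l => l ++ [w]) (nf.insert kv.1 [])
             ((PySem.List.sorted (aInnerDict kv.2).items fun p => p.1).map (fun ov => PySem.List.sorted ov.2 fun x => x)))
          from (List.foldl_map
            (f := fun ov : Int × List String => PySem.List.sorted ov.2 fun x => x)
            (g := fun (d : PySem.Dict Int (List (List String))) (w : List String) => d.modify kv.1 [] fun l => l ++ [w])
            (l := PySem.List.sorted (aInnerDict kv.2).items fun p => p.1)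
            (init := nf.insert kv.1 [])).symm]
      rw [modifyfold_items _ kv.1 _ nf.items []
            (PySem.Dict.items_insert_of_not_contains nf [] hc)
            (PySem.Dict.nodup_keys_insert nf kv.1 [] hknd)]
      simp [aInnerLists]
    have hkeys' : (aOuterStep nf kv).keys = nf.keys ++ [kv.1] := by
      simp only [PySem.Dict.keys, hstep, List.map_append, List.map_cons, List.map_nil]
    simp only [List.foldl_cons]
    rw [ih (aOuterStep nf kv) hnd.2
        (fun p hp => by
          have hne : p.1 ≠ kv.1 := fun he => hnd.1 (he ▸ List.mem_map_of_mem hp)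
          have hfr := hfresh p (List.mem_cons_of_mem _ hp)
          have hnm : p.1 ∉ (aOuterStep nf kv).keys := by
            rw [hkeys']
            simp only [List.mem_append, List.mem_singleton]
            rintro (hmem | hmem)
            · exact absurd ((PySem.Dict.contains_iff_mem_keys nf p.1).mpr hmem) (by simp [hfr])
            · exact hne hmem
          cases hcp : (aOuterStep nf kv).contains p.1 with
          | false => rfl
          | true => exact absurd ((PySem.Dict.contains_iff_mem_keys _ _).mp hcp) hnm)
        (by
          rw [hkeys', List.nodup_append]
          refine ⟨hknd, List.nodup_singleton _, ?_⟩
          intro a ha b hb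
          rw [List.mem_singleton] at hb
          subst hb
          exact fun he => absurd ((PySem.Dict.contains_iff_mem_keys nf kv.1).mpr (he ▸ ha)) (by simp [hc]))]
    rw [hstep]
    simp

lemma aInnerDict_eq_pvBuild (v : List (String × Int)) :
    aInnerDict v = pvBuild (v.map (fun fp => (fp.2, fp.1))) := by
  unfold aInnerDict pvBuild
  rw [List.foldl_map]
  exact PySem.List.foldl_congr_mem _ _ _ _ (fun acc fp _ => guard_insert_modify acc fp.2 fp.1)

lemma A_out (vtable : List (String × List (List String))) (className : String) (funcs : List String) :
    funcs.foldl (fun out sig =>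
      let index := groupForFunction vtable className sig
      let (group, order) : Int × Int := match index with
        | .inr vi => (0, vi)
        | .inl g => (g, 0)
      let out := if (out.getD group []).isEmpty then out.insert group [] else out
      out.modify group [] (fun v => v ++ [(sig, order)])) PySem.Dict.empty
    = pvBuild (funcs.map (pvM vtable className)) := by
  unfold pvBuild
  rw [List.foldl_map]
  apply PySem.List.foldl_congr_mem
  intro acc sig _
  simp only [pvM, keyOf]
  cases h : groupForFunction vtable className sig with
  | inl g => exact guard_modify acc g (sig, 0)
  | inr vi => exact guard_modify acc 0 (sig, vi)

lemma A_closed (vtable : List (String × List (List String))) (className : String) (funcs : List String) :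
    reorderFuncs vtable className funcs
      = (PySem.List.sorted (PySem.Set.ofList ((funcs.map (pvM vtable className)).map (fun p => p.1))) (fun x => x)).map
          (fun g => (g, aInnerLists (((funcs.map (pvM vtable className)).filter (fun p => p.1 == g)).map (fun p => p.2)))) := by
  unfold reorderFuncs
  rw [A_out]
  show (List.foldl aOuterStep PySem.Dict.empty
      (PySem.List.sorted (pvBuild (List.map (pvM vtable className) funcs)).items fun p => p.1)).items = _
  rw [sorted_items_pvBuild]
  rw [outer_fold _ PySem.Dict.empty
      (by
        have hpw : List.Pairwise (fun a b : Int => a ≠ b)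
            (PySem.List.sorted (PySem.Set.ofList ((funcs.map (pvM vtable className)).map (fun p => p.1))) (fun x => x)) :=
          (PySem.List.sorted_ofList_pairwise_lt _).imp (fun h => ne_of_lt h)
        simpa [List.map_map, Function.comp_def] using hpw)
      (fun p _ => PySem.Dict.contains_empty p.1)
      PySem.Dict.nodup_keys_empty]
  simp [List.map_map, Function.comp_def, PySem.Dict.empty]

lemma beq_pair (a : Int × Int) (g o : Int) : (a == (g, o)) = (a.1 == g && a.2 == o) := by
  cases a; rfl

lemma aInnerLists_closed (v : List (String × Int)) :
    aInnerLists v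
      = (PySem.List.sorted (PySem.Set.ofList (v.map (fun fp => fp.2))) (fun x => x)).map
          (fun o => PySem.List.sorted ((v.filter (fun fp => fp.2 == o)).map (fun fp => fp.1)) (fun x => x)) := by
  unfold aInnerLists
  rw [aInnerDict_eq_pvBuild, sorted_items_pvBuild]
  simp [List.map_map, Function.comp_def, List.filter_map]

lemma B_closed (vtable : List (String × List (List String))) (className : String) (funcs : List String) :
    reorderFuncs_alt vtable className funcs
      = (PySem.List.sorted (PySem.Set.ofList ((funcs.map (pvM vtable className)).map (fun p => p.1))) (fun x => x)).map
          (fun g => (g, aInnerLists (((funcs.map (pvM vtable className)).filter (fun p => p.1 == g)).map (fun p => p.2)))) := by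
  unfold reorderFuncs_alt
  simp only [aInnerLists_closed, List.map_map, List.filter_map, Function.comp_def, pvM]
  apply List.map_congr_left
  intro g _
  congr 1
  apply List.map_congr_left
  intro o _
  congr 1
  rw [List.filter_filter]
  congr 1
  apply List.filter_congr
  intro s _
  rw [beq_pair, Bool.and_comm]

-- ===== VERDICT (by name: the statement is the Claim_ definition above) =====
theorem reorderFuncs_spec : Claim_equal_reorderFuncs := by
  intro vtable className funcs _
  unfold Spec_reorderFuncs
  rw [A_closed, B_closed]
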